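-- pv_equiv track=rewrite | github.com/SouCampusV2/Second_Semester_Tasks | Algoritms/19.py | replace_exclamation_with_index
-- ===== SOURCE A (Python) =====
-- def replace_exclamation_with_index(input_string):
--     result = ''
--     for i, char in enumerate(input_string):
--         if char == '!':
--             result += str(i)
--         else:
--             result += char
--     return result
-- ===== SOURCE B (Python) =====
-- def replace_exclamation_with_index(input_string):
--     parts = input_string.split('!')
--     pieces = [parts[0]]
--     pos = len(parts[0])
--     for seg in parts[1:]:
--         pieces.append(str(pos))
--         pos += 1 + len(seg)
--         pieces.append(seg)
--     return ''.join(pieces)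
-- ===== Notes on version B (the rewrite author's own statement) =====
-- stated objective: faster
-- what changed: B splits the string on the delimiter once and reconstructs it segment by segment with a running original-index counter, instead of A's per-character loop with repeated string concatenation; joined pieces avoid quadratic += growth.
import Mathlib
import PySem

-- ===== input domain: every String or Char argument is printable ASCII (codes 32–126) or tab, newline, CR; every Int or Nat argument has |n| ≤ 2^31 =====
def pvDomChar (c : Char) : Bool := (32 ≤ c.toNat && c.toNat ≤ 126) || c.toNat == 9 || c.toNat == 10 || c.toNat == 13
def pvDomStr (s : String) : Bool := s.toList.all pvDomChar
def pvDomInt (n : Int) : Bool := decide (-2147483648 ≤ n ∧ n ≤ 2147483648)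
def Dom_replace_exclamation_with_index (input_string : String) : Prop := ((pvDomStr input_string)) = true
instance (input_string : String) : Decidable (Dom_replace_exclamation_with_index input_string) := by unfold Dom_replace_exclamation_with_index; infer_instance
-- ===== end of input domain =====

-- B replaces A's per-character loop by a split-on-'!' pass that reconstructs the string
-- segment by segment with a running original-index counter (objective: alternative).

-- ===== PORT A =====
-- literal port of A: enumerate the characters, append str(i) for '!' and the char otherwise
def replace_exclamation_with_index (input_string : String) : String :=
  String.mk ((PySem.List.enumerate input_string.toList 0).foldl
    (fun result p =>
      if p.2 = '!' then result ++ (PySem.Int.toStr p.1).toList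
      else result ++ [p.2]) [])

-- ===== PORT B =====
-- port of Source B: split('!') → List.splitOn '!', ''.join(pieces) → flatten
def replace_exclamation_with_index_alt (input_string : String) : String :=
  match List.splitOn '!' input_string.toList with
  | [] => ""  -- unreachable: splitOn never returns []
  | p0 :: rest =>
    let st := rest.foldl
      (fun (st : List (List Char) × Int) seg =>
        (st.1 ++ [(PySem.Int.toStr st.2).toList, seg], st.2 + 1 + (seg.length : Int)))
      ([p0], (p0.length : Int))
    String.mk st.1.flatten

-- ===== PRECONDITION & SPEC =====
def Spec_replace_exclamation_with_index (input_string : String) (out : String) : Prop := out = replace_exclamation_with_index_alt input_string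
instance (input_string : String) (out : String) : Decidable (Spec_replace_exclamation_with_index input_string out) := by unfold Spec_replace_exclamation_with_index; infer_instance

-- ===== CLAIM (what is proved, stated in full; the proofs are below) =====
def Claim_equal_replace_exclamation_with_index : Prop := ∀ (input_string : String), Dom_replace_exclamation_with_index input_string → Spec_replace_exclamation_with_index input_string (replace_exclamation_with_index input_string)

-- ===== LEMMAS AND PROOFS =====

-- rendering function of A on one (index, char) pair
def pvF (p : Int × Char) : List Char :=
  if p.2 = '!' then (PySem.Int.toStr p.1).toList else [p.2]

-- B's reconstruction of everything after the first segment, with running position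
def pvRest : List (List Char) → Int → List Char
  | [], _ => []
  | seg :: rest, pos =>
      (PySem.Int.toStr pos).toList ++ seg ++ pvRest rest (pos + 1 + seg.length)

theorem pvA_foldl (l : List (Int × Char)) (acc : List Char) :
    l.foldl (fun result p =>
      if p.2 = '!' then result ++ (PySem.Int.toStr p.1).toList
      else result ++ [p.2]) acc = acc ++ l.flatMap pvF := by
  induction l generalizing acc with
  | nil => simp
  | cons p l ih =>
      rw [List.foldl_cons, ih]
      simp only [pvF, List.flatMap_cons, ← List.append_assoc]
      split <;> simp

theorem pvEnum_append (xs ys : List Char) (s : Int) :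
    PySem.List.enumerate (xs ++ ys) s
      = PySem.List.enumerate xs s ++ PySem.List.enumerate ys (s + xs.length) := by
  induction xs generalizing s with
  | nil => simp [PySem.List.enumerate_nil]
  | cons x xs ih =>
      simp [PySem.List.enumerate_cons, ih, add_assoc]
      ring_nf

theorem pvNoBang (xs : List Char) (s : Int) (h : '!' ∉ xs) :
    (PySem.List.enumerate xs s).flatMap pvF = xs := by
  induction xs generalizing s with
  | nil => simp [PySem.List.enumerate_nil]
  | cons x xs ih =>
      simp only [List.mem_cons, not_or] at h
      simp [PySem.List.enumerate_cons, pvF, Ne.symm h.1, ih _ h.2]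

theorem pvSplit_noBang (cs : List Char) :
    ∀ part ∈ List.splitOn '!' cs, '!' ∉ part := by
  induction cs with
  | nil => simp [List.splitOn]
  | cons c cs ih =>
      intro part hp
      simp only [List.splitOn, List.splitOnP_cons] at hp ih
      by_cases hc : c = '!'
      · simp [hc] at hp
        rcases hp with h | h
        · simp [h]
        · exact ih part h
      · simp [hc] at hp
        rcases hsp : List.splitOnP (fun a => a == '!') cs with _ | ⟨h0, t⟩
        · exact absurd hsp (List.splitOnP_ne_nil _ _)
        · rw [hsp] at hp
          simp [List.modifyHead] at hp
          rcases hp with h | h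
          · subst h
            have h0mem : '!' ∉ h0 := ih h0 (by rw [hsp]; exact .head _)
            intro hmem
            rcases List.mem_cons.1 hmem with h | h
            · exact hc h.symm
            · exact h0mem h
          · exact ih part (by rw [hsp]; exact .tail _ h)

theorem pvMain (rest : List (List Char)) :
    ∀ (p0 : List Char) (pos : Int), '!' ∉ p0 → (∀ seg ∈ rest, '!' ∉ seg) →
    (PySem.List.enumerate (List.intercalate ['!'] (p0 :: rest)) pos).flatMap pvF
      = p0 ++ pvRest rest (pos + p0.length) := by
  induction rest with
  | nil =>
      intro p0 pos h0 _
      simp [List.intercalate, pvRest, pvNoBang _ _ h0]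
  | cons seg rest ih =>
      intro p0 pos h0 hr
      have hstep : List.intercalate ['!'] (p0 :: seg :: rest)
          = p0 ++ '!' :: List.intercalate ['!'] (seg :: rest) := by
        simp [List.intercalate, List.intersperse]
      rw [hstep]
      have : '!' :: List.intercalate ['!'] (seg :: rest)
          = ['!'] ++ List.intercalate ['!'] (seg :: rest) := rfl
      rw [this, ← List.append_assoc, pvEnum_append, pvEnum_append, List.flatMap_append,
        List.flatMap_append, pvNoBang _ _ h0]
      have hseg : '!' ∉ seg := hr seg (.head _)
      have hrest : ∀ s ∈ rest, '!' ∉ s := fun s hs => hr s (.tail _ hs)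
      rw [ih seg _ hseg hrest]
      simp [PySem.List.enumerate_cons, PySem.List.enumerate_nil, pvF, pvRest]
      ring_nf

theorem pvB_foldl (rest : List (List Char)) :
    ∀ (acc : List (List Char)) (pos : Int),
    ((rest.foldl (fun (st : List (List Char) × Int) seg =>
        (st.1 ++ [(PySem.Int.toStr st.2).toList, seg], st.2 + 1 + (seg.length : Int)))
      (acc, pos)).1).flatten = acc.flatten ++ pvRest rest pos := by
  induction rest with
  | nil => simp [pvRest]
  | cons seg rest ih =>
      intro acc pos
      simp only [List.foldl_cons, ih, pvRest]
      simp

-- ===== VERDICT (by name: the statement is the Claim_ definition above) =====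
theorem replace_exclamation_with_index_spec : Claim_equal_replace_exclamation_with_index := by
  intro s _
  show _ = _
  unfold replace_exclamation_with_index replace_exclamation_with_index_alt
  rcases hsp : List.splitOn '!' s.toList with _ | ⟨p0, rest⟩
  · exact absurd hsp (by simpa [List.splitOn] using List.splitOnP_ne_nil (· == '!') s.toList)
  · have hno := pvSplit_noBang s.toList
    rw [hsp] at hno
    have hic : List.intercalate ['!'] (p0 :: rest) = s.toList := by
      have := List.intercalate_splitOn (x := '!') (xs := s.toList)
      rw [hsp] at this; simpa using this
    rw [pvA_foldl]
    dsimp only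
    rw [pvB_foldl rest [p0] ((p0.length : Int))]
    rw [← hic, pvMain rest p0 0 (hno p0 (.head _)) (fun seg hs => hno seg (.tail _ hs))]
    simp
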